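-- pv_equiv track=rewrite | github.com/son-phi/tai_lieu_hoc | ki4/pythonprogram/codeptit.py | check
-- ===== SOURCE A (Python) =====
-- def check(a):
--     st = str(a)
--     if len(st)%2==1: return False
--     n= len(st)
--     h1 = st[:n//2]
--     h2 = st[n//2:]
--
--     if h1 != h2[::-1]: return False
--     for x in st:
--         if int(x)%2==1: return False
--     return True
-- ===== SOURCE B (Python) =====
-- def check(a):
--     st = str(a)
--     n = len(st)
--     if n % 2 == 1:
--         return False
--     return all(st[i] == st[n - 1 - i] and st[i] in "02468" for i in range(n // 2))
-- ===== Notes on version B (the rewrite author's own statement) =====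
-- stated objective: alternative
-- what changed: Replaces A's slice/reverse half-string comparison followed by a separate full-string int()-parity loop with a single half-length indexed pass that checks each mirror pair and digit membership in '02468' together.
import Mathlib
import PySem

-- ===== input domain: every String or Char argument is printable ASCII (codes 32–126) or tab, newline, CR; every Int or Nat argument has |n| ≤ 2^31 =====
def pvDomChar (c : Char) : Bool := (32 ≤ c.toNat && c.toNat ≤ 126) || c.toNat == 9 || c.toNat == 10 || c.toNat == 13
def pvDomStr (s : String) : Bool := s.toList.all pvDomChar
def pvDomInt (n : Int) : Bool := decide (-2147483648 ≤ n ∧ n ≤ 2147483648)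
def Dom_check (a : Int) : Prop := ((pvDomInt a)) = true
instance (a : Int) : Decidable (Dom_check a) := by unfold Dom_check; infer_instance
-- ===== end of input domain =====

-- B fuses A's slice/reverse half comparison and its separate full-string int()-parity loop
-- into one half-length indexed pass checking mirror pairs and membership in "02468" (alternative decomposition, same cost).


-- ===== PORT A =====
-- int(x) on a one-character string: PySem.Int.ofChars? [x]; the none (ValueError) case is
-- unreachable in A (the mirror guard has already failed on any non-digit), so .getD 0 marks it.
def check (a : Int) : Bool :=
  let st := PySem.Int.toChars a
  if PySem.Int.mod (PySem.List.len st) 2 == 1 then false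
  else
    let n := PySem.List.len st
    let h1 := PySem.List.slice st none (some (PySem.Int.floordiv n 2))
    let h2 := PySem.List.slice st (some (PySem.Int.floordiv n 2)) none
    if h1 ≠ (PySem.List.slice? h2 none none (-1)).getD [] then false
    else st.all (fun x => !(PySem.Int.mod ((PySem.Int.ofChars? [x]).getD 0) 2 == 1))

-- ===== PORT B =====
-- st[i] never raises here (0 ≤ i < n/2 ≤ n and 0 ≤ n-1-i < n), so pyGetD with a dummy default is exact.
def check_alt (a : Int) : Bool :=
  let st := PySem.Int.toChars a
  let n := PySem.List.len st
  if PySem.Int.mod n 2 == 1 then false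
  else
    (PySem.List.pyRange 0 (PySem.Int.floordiv n 2) 1).all (fun i =>
      (PySem.List.pyGetD st i ' ' == PySem.List.pyGetD st (n - 1 - i) ' ') &&
      PySem.Chars.isIn [PySem.List.pyGetD st i ' '] ['0', '2', '4', '6', '8'])

-- ===== PRECONDITION & SPEC =====
def Spec_check (a : Int) (out : Bool) : Prop := out = check_alt a
instance (a : Int) (out : Bool) : Decidable (Spec_check a out) := by unfold Spec_check; infer_instance

-- ===== CLAIM (what is proved, stated in full; the proofs are below) =====
def Claim_equal_check : Prop := ∀ (a : Int), Dom_check a → Spec_check a (check a)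

-- ===== LEMMAS AND PROOFS =====

def pvDigits : List Char := ['0', '1', '2', '3', '4', '5', '6', '7', '8', '9']

theorem pv_digitChar_mem (m : Nat) (h : m < 10) : m.digitChar ∈ pvDigits := by
  interval_cases m <;> decide

theorem pv_tdc_mem (f : Nat) : ∀ (n : Nat) (acc : List Char),
    ∀ c ∈ Nat.toDigitsCore 10 f n acc, c ∈ acc ∨ c ∈ pvDigits := by
  induction f with
  | zero => intro n acc c hc; simp [Nat.toDigitsCore] at hc; exact Or.inl hc
  | succ f ih =>
    intro n acc c hc
    simp only [Nat.toDigitsCore] at hc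
    split at hc
    · rcases List.mem_cons.mp hc with h | h
      · exact Or.inr (h ▸ pv_digitChar_mem _ (Nat.mod_lt _ (by norm_num)))
      · exact Or.inl h
    · rcases ih _ _ _ hc with h | h
      · rcases List.mem_cons.mp h with h' | h'
        · exact Or.inr (h' ▸ pv_digitChar_mem _ (Nat.mod_lt _ (by norm_num)))
        · exact Or.inl h'
      · exact Or.inr h

theorem pv_tdc_ne_nil_of_acc (b f : Nat) : ∀ (n : Nat) (acc : List Char),
    acc ≠ [] → Nat.toDigitsCore b f n acc ≠ [] := by
  induction f with
  | zero => intro n acc h; simpa [Nat.toDigitsCore]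
  | succ f ih =>
    intro n acc h
    simp only [Nat.toDigitsCore]
    split
    · simp
    · exact ih _ _ (by simp)

theorem pv_toDigits_ne_nil (m : Nat) : Nat.toDigits 10 m ≠ [] := by
  unfold Nat.toDigits
  simp only [Nat.toDigitsCore]
  split
  · simp
  · exact pv_tdc_ne_nil_of_acc _ _ _ _ (by simp)

theorem pv_toDigits_mem (m : Nat) : ∀ c ∈ Nat.toDigits 10 m, c ∈ pvDigits := by
  intro c hc
  rcases pv_tdc_mem _ _ _ _ hc with h | h
  · simp at h
  · exact h

-- A's per-character parity test agrees with B's membership test on digit characters.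
theorem pv_parity_agree (c : Char) (hc : c ∈ pvDigits) :
    (!(PySem.Int.mod ((PySem.Int.ofChars? [c]).getD 0) 2 == 1))
      = PySem.Chars.isIn [c] ['0', '2', '4', '6', '8'] := by
  fin_cases hc <;> decide

theorem pv_digit_ne_dash (c : Char) (hc : c ∈ pvDigits) : c ≠ '-' := by
  fin_cases hc <;> decide

-- the half-vs-reversed-half comparison as a pointwise mirror condition (even length 2*k)
theorem pv_mirror_iff (l : List Char) (k : Nat) (hn : l.length = 2 * k) :
    l.take k = (l.drop k).reverse ↔
      ∀ i (hi : i < k), l[i]'(by omega) = l[2 * k - 1 - i]'(by omega) := by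
  have hlt : (l.take k).length = k := by simp; omega
  have hld : (l.drop k).length = k := by simp; omega
  constructor
  · intro h i hi
    have := List.getElem_of_eq h (by omega : i < (l.take k).length)
    rw [List.getElem_take] at this
    rw [this, List.getElem_reverse, List.getElem_drop]
    congr 1
    omega
  · intro h
    apply List.ext_getElem (by simp [hld]; omega)
    intro i h1 h2
    rw [List.getElem_take, List.getElem_reverse, List.getElem_drop]
    have := h i (by omega)
    convert this using 2
    omega

-- B's loop is false as soon as one mirror pair differs
theorem pv_B_false (l : List Char) (k i : Nat) (hk : l.length = 2*k) (hi : i < k)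
    (hne : l[i]'(by omega) ≠ l[2*k-1-i]'(by omega)) :
    ((PySem.List.pyRange 0 (k:Int) 1).all fun j =>
        (PySem.List.pyGetD l j ' ' == PySem.List.pyGetD l ((l.length : Int) - 1 - j) ' ') &&
          PySem.Chars.isIn [PySem.List.pyGetD l j ' '] ['0','2','4','6','8']) = false := by
  rw [List.all_eq_false]
  refine ⟨(i : Int), ?_, ?_⟩
  · rw [PySem.List.mem_pyRange_one]
    constructor <;> [positivity; exact_mod_cast hi]
  · have e2 : ((l.length : Int) - 1 - (i : Int)) = ((2*k-1-i : Nat) : Int) := by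
      push_cast [hk]; omega
    rw [e2]
    simp only [PySem.List.pyGetD_natCast]
    rw [List.getD_eq_getElem l ' ' (by omega), List.getD_eq_getElem l ' ' (by omega)]
    simp [hne]

-- when the mirror holds on an all-digit string, A's full parity loop equals B's half loop
theorem pv_B_eq_allA (l : List Char) (k : Nat) (hk : l.length = 2*k)
    (hd : ∀ c ∈ l, c ∈ pvDigits) (hm : l.take k = (l.drop k).reverse) :
    (l.all fun x => !(PySem.Int.mod ((PySem.Int.ofChars? [x]).getD 0) 2 == 1)) =
    ((PySem.List.pyRange 0 (k:Int) 1).all fun j =>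
        (PySem.List.pyGetD l j ' ' == PySem.List.pyGetD l ((l.length : Int) - 1 - j) ' ') &&
          PySem.Chars.isIn [PySem.List.pyGetD l j ' '] ['0','2','4','6','8']) := by
  have bext : ∀ x y : Bool, (x = true ↔ y = true) → x = y := by decide
  apply bext
  simp only [List.all_eq_true]
  have hmir := (pv_mirror_iff l k hk).mp hm
  constructor
  · intro h j hj
    rw [PySem.List.mem_pyRange_one] at hj
    obtain ⟨hj0, hjk⟩ := hj
    set j0 := j.toNat with hj0def
    have hjeq : j = (j0 : Int) := by omega
    have hj0k : j0 < k := by omega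
    have e2 : ((l.length : Int) - 1 - (j0:Int)) = ((2*k-1-j0 : Nat) : Int) := by
      push_cast [hk]; omega
    rw [hjeq, e2]
    simp only [PySem.List.pyGetD_natCast]
    rw [List.getD_eq_getElem l ' ' (by omega), List.getD_eq_getElem l ' ' (by omega)]
    have hpar := h (l[j0]'(by omega)) (List.getElem_mem _)
    rw [pv_parity_agree _ (hd _ (List.getElem_mem _))] at hpar
    simp [← hmir j0 hj0k, hpar]
  · intro h c hc
    obtain ⟨j, hjl, rfl⟩ := List.getElem_of_mem hc
    rw [pv_parity_agree _ (hd _ (List.getElem_mem _))]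
    rcases lt_or_ge j k with hjk | hjk
    · have := h (j : Int) (by rw [PySem.List.mem_pyRange_one]; constructor <;> omega)
      have e2 : ((l.length : Int) - 1 - (j:Int)) = ((2*k-1-j : Nat) : Int) := by
        push_cast [hk]; omega
      rw [e2] at this
      simp only [PySem.List.pyGetD_natCast] at this
      rw [List.getD_eq_getElem l ' ' (by omega), List.getD_eq_getElem l ' ' (by omega)] at this
      exact (by simpa using this : _ ∧ _).2
    · set i := 2*k-1-j with hidef
      have hik : i < k := by omega
      have := h (i : Int) (by rw [PySem.List.mem_pyRange_one]; constructor <;> omega)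
      have e2 : ((l.length : Int) - 1 - (i:Int)) = ((2*k-1-i : Nat) : Int) := by
        push_cast [hk]; omega
      rw [e2] at this
      simp only [PySem.List.pyGetD_natCast] at this
      rw [List.getD_eq_getElem l ' ' (by omega), List.getD_eq_getElem l ' ' (by omega)] at this
      obtain ⟨heq, hpar⟩ : _ ∧ _ := by simpa using this
      have hje : 2*k-1-i = j := by omega
      have heq' : l[i]'(by omega) = l[j]'(by omega) := by
        rw [heq]; simp only [hje]
      rw [← heq']
      exact hpar

theorem check_spec' (a : Int) : check a = check_alt a := by
  unfold check check_alt
  simp only [PySem.List.len_eq]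
  set l := PySem.Int.toChars a with hl
  by_cases hodd : l.length % 2 = 1
  · have hg : (PySem.Int.mod (↑l.length) 2 == 1) = true := by
      rw [PySem.Int.mod_eq_emod_of_pos (by omega : (0:Int) < 2)]
      simp; omega
    rw [hg]; simp
  · have hg : (PySem.Int.mod (↑l.length) 2 == 1) = false := by
      rw [PySem.Int.mod_eq_emod_of_pos (by omega : (0:Int) < 2)]
      simp; omega
    rw [hg]
    simp only [Bool.false_eq_true, if_false]
    obtain ⟨k, hk⟩ : ∃ k, l.length = 2 * k := by
      refine ⟨l.length / 2, ?_⟩; omega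
    have hfd : PySem.Int.floordiv (↑l.length) 2 = (k : Int) := by
      rw [PySem.Int.floordiv_eq_ediv_of_pos (by omega : (0:Int) < 2)]
      omega
    simp only [hfd, PySem.List.slice_to_natCast, PySem.List.slice_from_natCast,
        PySem.List.slice?_none_none_neg_one, Option.getD_some]
    rcases lt_or_ge a 0 with hneg | hpos
    · -- negative a: st = '-' :: digits; both sides are false
      have hlds : l = '-' :: Nat.toDigits 10 a.natAbs := by
        rw [hl]; unfold PySem.Int.toChars; rw [if_pos hneg]
      set ds := Nat.toDigits 10 a.natAbs with hds
      have hdsne : ds ≠ [] := pv_toDigits_ne_nil _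
      have hlen : l.length = ds.length + 1 := by rw [hlds]; simp
      have hk1 : 1 ≤ k := by
        have := List.length_pos_of_ne_nil hdsne
        omega
      have h0 : l[0]'(by omega) = '-' := by
        simp [hlds]
      have hlast : l[2*k-1]'(by omega) ≠ '-' := by
        have h2 : l[2*k-1]'(by omega) = ds[2*k-2]'(by omega) := by
          have e : 2*k-1 = (2*k-2)+1 := by omega
          simp only [hlds, e, List.getElem_cons_succ]
        rw [h2]
        exact pv_digit_ne_dash _ (pv_toDigits_mem _ _ (List.getElem_mem _))
      have hne0 : l[0]'(by omega) ≠ l[2*k-1]'(by omega) := by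
        rw [h0]; exact fun h => hlast h.symm
      have hmne : l.take k ≠ (l.drop k).reverse := by
        intro hm
        exact hne0 (by simpa using (pv_mirror_iff l k hk).mp hm 0 (by omega))
      rw [if_pos hmne]
      exact (pv_B_false l k 0 hk (by omega) (by simpa using hne0)).symm
    · -- nonnegative a: all characters are digits
      have hld : l = Nat.toDigits 10 a.toNat := by
        rw [hl]; unfold PySem.Int.toChars; rw [if_neg (by omega)]
      have hd : ∀ c ∈ l, c ∈ pvDigits := by rw [hld]; exact pv_toDigits_mem _
      by_cases hm : l.take k = (l.drop k).reverse
      · rw [if_neg (by simpa using hm)]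
        exact pv_B_eq_allA l k hk hd hm
      · rw [if_pos hm]
        have hnall : ¬ ∀ i (hi : i < k), l[i]'(by omega) = l[2*k-1-i]'(by omega) :=
          fun h => hm ((pv_mirror_iff l k hk).mpr h)
        push Not at hnall
        obtain ⟨i, hi, hne⟩ := hnall
        exact (pv_B_false l k i hk hi hne).symm

-- ===== VERDICT (by name: the statement is the Claim_ definition above) =====
theorem check_spec : Claim_equal_check := by
  intro a _
  unfold Spec_check
  exact check_spec' a
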